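-- pv_equiv track=rewrite | github.com/EeyoungSong/codetree-TILs | 240102/Time to Time/time-to-time.py | calc_minutes
-- ===== SOURCE A (Python) =====
-- def calc_minutes(a, b, c, d):
--     elapsed_time = 0
--     hour = a
--     mins = b
--     while True:
--         if hour == c and mins == d:
--             break
--
--         elapsed_time += 1
--         mins += 1
--
--         if mins == 60:
--             hour += 1
--             mins = 0
--     return elapsed_time
-- ===== SOURCE B (Python) =====
-- # Closed-form: minutes elapsed = difference of the two times expressed in minutes.
-- def calc_minutes(a, b, c, d):
--     return (c - a) * 60 + (d - b)
-- ===== Notes on version B (the rewrite author's own statement) =====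
-- stated objective: faster
-- what changed: Replaces the minute-by-minute counting loop with the closed-form difference (c-a)*60+(d-b); Pre_ restricts to inputs where A's loop actually reaches (c,d) (elsewhere A diverges and returns nothing).
import Mathlib
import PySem

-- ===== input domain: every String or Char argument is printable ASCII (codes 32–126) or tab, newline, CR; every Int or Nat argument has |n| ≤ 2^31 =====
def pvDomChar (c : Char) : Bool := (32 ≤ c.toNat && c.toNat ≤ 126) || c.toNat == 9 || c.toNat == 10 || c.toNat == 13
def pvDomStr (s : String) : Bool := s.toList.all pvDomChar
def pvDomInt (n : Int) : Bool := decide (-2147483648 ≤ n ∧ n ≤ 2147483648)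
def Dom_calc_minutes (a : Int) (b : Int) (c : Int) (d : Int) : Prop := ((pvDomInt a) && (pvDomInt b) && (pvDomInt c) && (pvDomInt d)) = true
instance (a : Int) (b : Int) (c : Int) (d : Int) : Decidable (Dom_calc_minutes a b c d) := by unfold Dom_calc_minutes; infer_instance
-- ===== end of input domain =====

-- B replaces A's minute-by-minute while-loop with the closed form (c-a)*60+(d-b) (O(1) vs O(elapsed)).


-- ===== PORT A =====
-- A's `while True` loop, transliterated with a fuel parameter only to make it total;
-- under Pre_ the fuel is sufficient and is never exhausted.
def pvLoopA (c d : Int) : Nat → Int → Int → Int → Int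
  | 0, elapsed, _, _ => elapsed
  | n+1, elapsed, hour, mins =>
      if hour = c ∧ mins = d then elapsed
      else
        let elapsed := elapsed + 1
        let mins := mins + 1
        if mins = 60 then pvLoopA c d n elapsed (hour + 1) 0
        else pvLoopA c d n elapsed hour mins

def calc_minutes (a : Int) (b : Int) (c : Int) (d : Int) : Int :=
  pvLoopA c d ((60 * (c - a) + (d - b)).toNat + 1) 0 a b

-- ===== PORT B =====
def calc_minutes_alt (a : Int) (b : Int) (c : Int) (d : Int) : Int :=
  (c - a) * 60 + (d - b)

-- ===== PRECONDITION & SPEC =====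
-- Pre_ is exactly the set of inputs on which A's loop terminates (A returns); on all
-- other inputs A's while-loop never reaches (c,d) and A diverges, returning nothing.
def Pre_calc_minutes (a : Int) (b : Int) (c : Int) (d : Int) : Prop :=
  (c = a ∧ b ≤ d ∧ (b ≤ 59 → d ≤ 59)) ∨ (b ≤ 59 ∧ a < c ∧ 0 ≤ d ∧ d ≤ 59)
instance (a : Int) (b : Int) (c : Int) (d : Int) : Decidable (Pre_calc_minutes a b c d) := by
  unfold Pre_calc_minutes; infer_instance

def pvWitness_calc_minutes : Int × Int × Int × Int := (1, 30, 2, 0)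

def Spec_calc_minutes (a : Int) (b : Int) (c : Int) (d : Int) (out : Int) : Prop := out = calc_minutes_alt a b c d
instance (a : Int) (b : Int) (c : Int) (d : Int) (out : Int) : Decidable (Spec_calc_minutes a b c d out) := by unfold Spec_calc_minutes; infer_instance

-- ===== CLAIM (what is proved, stated in full; the proofs are below) =====
def Claim_equal_calc_minutes : Prop := ∀ (a : Int) (b : Int) (c : Int) (d : Int), Dom_calc_minutes a b c d → Pre_calc_minutes a b c d → Spec_calc_minutes a b c d (calc_minutes a b c d)

-- ===== LEMMAS AND PROOFS =====

-- Evaluation of A's loop: if from state (h,m) the target (c,d) is reachable (first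
-- disjunct: same hour forever; second: hour still has to advance) and lies exactly n
-- steps ahead, the loop returns elapsed + n without exhausting fuel n+1.
lemma pvLoopA_eval : ∀ (n : Nat) (c d e h m : Int),
    ((c = h ∧ m ≤ d ∧ (m ≤ 59 → d ≤ 59)) ∨ (m ≤ 59 ∧ h < c ∧ 0 ≤ d ∧ d ≤ 59)) →
    (n : Int) = 60 * (c - h) + (d - m) →
    pvLoopA c d (n + 1) e h m = e + n := by
  intro n
  induction n with
  | zero =>
      intro c d e h m hpre hn
      have hh : h = c ∧ m = d := by
        rcases hpre with ⟨h1, h2, h3⟩ | ⟨h1, h2, h3, h4⟩ <;> [skip; skip] <;> omega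
      simp [pvLoopA, hh.1, hh.2]
  | succ n ih =>
      intro c d e h m hpre hn
      push_cast at hn
      have hne : ¬ (h = c ∧ m = d) := by
        rintro ⟨rfl, rfl⟩; omega
      by_cases hm : m + 1 = 60
      · have hpre' : (c = h + 1 ∧ (0:Int) ≤ d ∧ ((0:Int) ≤ 59 → d ≤ 59)) ∨
            ((0:Int) ≤ 59 ∧ h + 1 < c ∧ 0 ≤ d ∧ d ≤ 59) := by
          rcases hpre with ⟨h1, h2, h3⟩ | ⟨h1, h2, h3, h4⟩ <;> omega
        have hrec := ih c d (e + 1) (h + 1) 0 hpre' (by push_cast; omega)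
        show pvLoopA c d (n + 1 + 1) e h m = _
        rw [pvLoopA]
        rw [if_neg hne, if_pos hm, hrec]
        push_cast
        ring
      · have hpre' : (c = h ∧ m + 1 ≤ d ∧ (m + 1 ≤ 59 → d ≤ 59)) ∨
            (m + 1 ≤ 59 ∧ h < c ∧ 0 ≤ d ∧ d ≤ 59) := by
          rcases hpre with ⟨h1, h2, h3⟩ | ⟨h1, h2, h3, h4⟩
          · left; refine ⟨h1, ?_, fun _ => h3 (by omega)⟩
            rcases eq_or_lt_of_le h2 with h | h
            · exact absurd ⟨h1.symm ▸ rfl, h⟩ hne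
            · omega
          · right; omega
        have hrec := ih c d (e + 1) h (m + 1) hpre' (by push_cast; omega)
        show pvLoopA c d (n + 1 + 1) e h m = _
        rw [pvLoopA]
        rw [if_neg hne, if_neg hm, hrec]
        push_cast
        ring

-- ===== VERDICT (by name: the statement is the Claim_ definition above) =====
theorem calc_minutes_spec : Claim_equal_calc_minutes := by
  intro a b c d _ hpre
  unfold Pre_calc_minutes at hpre
  unfold Spec_calc_minutes calc_minutes calc_minutes_alt
  have hnn : 0 ≤ 60 * (c - a) + (d - b) := by
    rcases hpre with ⟨h1, h2, h3⟩ | ⟨h1, h2, h3, h4⟩ <;> omega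
  set n : Nat := (60 * (c - a) + (d - b)).toNat with hn
  have hcast : (n : Int) = 60 * (c - a) + (d - b) := by
    rw [hn, Int.toNat_of_nonneg hnn]
  have := pvLoopA_eval n c d 0 a b hpre hcast
  rw [this, hcast]; ring
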